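-- pv_equiv track=rewrite | github.com/jonasRower/myW3schools | prepareData/json html/Python cssJson/python/externiJs.py | ziskejCestuProGenerovaniJs
-- ===== SOURCE A (Python) =====
-- def ziskejCestuProGenerovaniJs(cestaHtmlSrc):
--
--     cestaHtmlSpl = cestaHtmlSrc.split('\\')
--     cestaBezSouboru = ''
--
--     for i in range(0, len(cestaHtmlSpl)-1):
--         slozka = cestaHtmlSpl[i]
--         cestaBezSouboru = cestaBezSouboru + slozka + '\\'
--
--     cestaJsBezSouboru = cestaBezSouboru.replace('language\\js', 'generatedJs')
--     nazevSouboru = cestaHtmlSpl[len(cestaHtmlSpl)-1]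
--     nazevSouboruJs = nazevSouboru.replace('.html', '.js')
--
--     cestaJsSrc = cestaJsBezSouboru + nazevSouboruJs
--
--     return(cestaJsSrc)
-- ===== SOURCE B (Python) =====
-- def ziskejCestuProGenerovaniJs(cestaHtmlSrc):
--     slozky, oddelovac, soubor = cestaHtmlSrc.rpartition('\\')
--     prefix = (slozky + oddelovac).replace('language\\js', 'generatedJs')
--     return prefix + soubor.replace('.html', '.js')
-- ===== Notes on version B (the rewrite author's own statement) =====
-- stated objective: simpler
-- what changed: Replaces split-into-components plus an index loop rebuilding the directory prefix by a single rpartition on the last backslash; no component list or loop exists.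
import Mathlib
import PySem

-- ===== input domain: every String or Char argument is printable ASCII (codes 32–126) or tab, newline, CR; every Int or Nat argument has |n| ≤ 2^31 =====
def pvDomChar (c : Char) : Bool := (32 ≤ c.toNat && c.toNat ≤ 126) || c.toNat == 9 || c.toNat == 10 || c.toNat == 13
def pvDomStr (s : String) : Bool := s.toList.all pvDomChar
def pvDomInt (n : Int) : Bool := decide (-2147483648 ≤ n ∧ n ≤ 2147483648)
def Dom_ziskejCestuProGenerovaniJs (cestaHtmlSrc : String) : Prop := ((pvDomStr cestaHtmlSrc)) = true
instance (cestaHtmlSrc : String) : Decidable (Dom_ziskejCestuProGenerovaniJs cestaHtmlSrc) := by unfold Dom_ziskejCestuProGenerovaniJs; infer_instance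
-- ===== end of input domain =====

-- B replaces the split-all-components-plus-rebuild-loop by a single rpartition at the
-- last backslash; same return value, simpler decomposition (no component list, no loop).
-- ===== PORT A =====
def ziskejCestuProGenerovaniJs (cestaHtmlSrc : String) : String :=
  let cestaHtmlSpl := PySem.Chars.splitOn cestaHtmlSrc.toList ['\\']
  let cestaBezSouboru :=
    (PySem.List.pyRange 0 ((cestaHtmlSpl.length : Int) - 1) 1).foldl
      (fun acc i => acc ++ PySem.List.pyGetD cestaHtmlSpl i [] ++ ['\\']) ([] : List Char)
  let cestaJsBezSouboru :=
    PySem.Chars.replace cestaBezSouboru "language\\js".toList "generatedJs".toList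
  let nazevSouboru := PySem.List.pyGetD cestaHtmlSpl ((cestaHtmlSpl.length : Int) - 1) []
  let nazevSouboruJs := PySem.Chars.replace nazevSouboru ".html".toList ".js".toList
  String.ofList (cestaJsBezSouboru ++ nazevSouboruJs)

-- ===== PORT B =====
-- hand port of str.rpartition(sep) for the one-character sep '\\':
-- scan the reversed list up to the first backslash.
def ziskejCestuProGenerovaniJs_alt (cestaHtmlSrc : String) : String :=
  let rev := cestaHtmlSrc.toList.reverse
  let soubor := (rev.takeWhile (· != '\\')).reverse          -- rpartition's third component
  let predpona := (rev.dropWhile (· != '\\')).reverse          -- slozky ++ oddelovac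
  String.ofList (PySem.Chars.replace predpona "language\\js".toList "generatedJs".toList
             ++ PySem.Chars.replace soubor ".html".toList ".js".toList)

-- ===== PRECONDITION & SPEC =====
def Spec_ziskejCestuProGenerovaniJs (cestaHtmlSrc : String) (out : String) : Prop := out = ziskejCestuProGenerovaniJs_alt cestaHtmlSrc
instance (cestaHtmlSrc : String) (out : String) : Decidable (Spec_ziskejCestuProGenerovaniJs cestaHtmlSrc out) := by unfold Spec_ziskejCestuProGenerovaniJs; infer_instance

-- ===== CLAIM (what is proved, stated in full; the proofs are below) =====
def Claim_equal_ziskejCestuProGenerovaniJs : Prop := ∀ (cestaHtmlSrc : String), Dom_ziskejCestuProGenerovaniJs cestaHtmlSrc → Spec_ziskejCestuProGenerovaniJs cestaHtmlSrc (ziskejCestuProGenerovaniJs cestaHtmlSrc)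

-- ===== LEMMAS AND PROOFS =====

-- reference structural recursion for split on a single backslash
def mySplit : List Char → List (List Char)
  | [] => [[]]
  | c :: t => if c = '\\' then [] :: mySplit t else (mySplit t).modifyHead (c :: ·)

lemma mySplit_ne_nil (cs : List Char) : mySplit cs ≠ [] := by
  induction cs with
  | nil => simp [mySplit]
  | cons c t ih =>
    simp only [mySplit]
    split
    · simp
    · obtain ⟨p, ps, hps⟩ := List.exists_cons_of_ne_nil ih
      rw [hps]
      simp [List.modifyHead]

lemma splitOn_go_eq (l : List Char) : ∀ (fuel : Nat) (cur : List Char) (acc : List (List Char)),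
    l.length ≤ fuel →
    PySem.Chars.splitOn.go ['\\'] fuel l cur acc
      = acc.reverse ++ (mySplit l).modifyHead (cur.reverse ++ ·) := by
  induction l with
  | nil =>
    intro fuel cur acc _
    cases fuel <;> simp [PySem.Chars.splitOn.go, mySplit, List.modifyHead]
  | cons c t ih =>
    intro fuel cur acc hf
    cases fuel with
    | zero => simp at hf
    | succ f =>
      simp only [PySem.Chars.splitOn.go]
      by_cases hc : c = '\\'
      · have hpre : List.isPrefixOf ['\\'] (c :: t) = true := by
          simp [List.isPrefixOf, hc]
        rw [if_pos hpre]
        have := ih f [] (cur.reverse :: acc) (by simpa using Nat.le_of_succ_le_succ hf)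
        simp only [List.length_cons, List.length_nil, List.drop_succ_cons, List.drop_zero]
        rw [this]
        obtain ⟨p, ps, hps⟩ := List.exists_cons_of_ne_nil (mySplit_ne_nil t)
        simp [mySplit, hc, hps, List.modifyHead]
      · have hpre : List.isPrefixOf ['\\'] (c :: t) = false := by
          simp [List.isPrefixOf, hc]
          exact fun h => absurd h.symm hc
        rw [if_neg (by simp [hpre])]
        rw [ih f (c :: cur) acc (Nat.le_of_succ_le_succ hf)]
        simp only [mySplit, if_neg hc]
        congr 1
        obtain ⟨p, ps, hps⟩ := List.exists_cons_of_ne_nil (mySplit_ne_nil t)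
        rw [hps]
        simp [List.modifyHead]

lemma splitOn_eq_mySplit (cs : List Char) :
    PySem.Chars.splitOn cs ['\\'] = mySplit cs := by
  have := splitOn_go_eq cs (cs.length + 1) [] [] (Nat.le_succ _)
  obtain ⟨p, ps, hps⟩ := List.exists_cons_of_ne_nil (mySplit_ne_nil cs)
  rw [PySem.Chars.splitOn, this, hps]
  simp [List.modifyHead]

lemma mySplit_no_bs {t : List Char} (h : '\\' ∉ t) : mySplit t = [t] := by
  induction t with
  | nil => simp [mySplit]
  | cons c u ih =>
    simp only [List.mem_cons, not_or] at h
    have hc : c ≠ '\\' := fun hh => h.1 hh.symm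
    simp [mySplit, hc, ih h.2, List.modifyHead]

lemma mySplit_two_le {t : List Char} (h : '\\' ∈ t) : 2 ≤ (mySplit t).length := by
  induction t with
  | nil => simp at h
  | cons c u ih =>
    by_cases hc : c = '\\'
    · simp only [mySplit, if_pos hc, List.length_cons]
      have := List.length_pos_of_ne_nil (mySplit_ne_nil u)
      omega
    · have hu : '\\' ∈ u := by
        rcases List.mem_cons.mp h with h1 | h1
        · exact absurd h1.symm hc
        · exact h1
      have := ih hu
      simpa [mySplit, if_neg hc, List.length_modifyHead] using this

-- canonical last-backslash decomposition: (predpona incl. final '\\', filename)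
def lastSplit : List Char → List Char × List Char
  | [] => ([], [])
  | c :: t =>
    if '\\' ∈ t then (c :: (lastSplit t).1, (lastSplit t).2)
    else if c = '\\' then (['\\'], t)
    else ([], c :: t)

lemma mySplit_to_lastSplit (cs : List Char) :
    ((mySplit cs).dropLast.flatMap (· ++ ['\\']) = (lastSplit cs).1)
    ∧ (mySplit cs).getLastD [] = (lastSplit cs).2 := by
  induction cs with
  | nil => simp [mySplit, lastSplit]
  | cons c t ih =>
    by_cases ht : '\\' ∈ t
    · obtain ⟨p, ps, hps⟩ := List.exists_cons_of_ne_nil (mySplit_ne_nil t)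
      have hps2 : ps ≠ [] := by
        have := mySplit_two_le ht
        rw [hps] at this
        simp only [List.length_cons] at this
        intro h; rw [h] at this; simp at this
      by_cases hc : c = '\\'
      · simp only [mySplit, if_pos hc, lastSplit, if_pos ht]
        constructor
        · rw [List.dropLast_cons_of_ne_nil (mySplit_ne_nil t)]
          simp only [List.flatMap_cons, List.nil_append]
          rw [ih.1, hc, List.singleton_append]
        · rw [List.getLastD_cons]
          exact ih.2
      · have hms : mySplit (c :: t) = (c :: p) :: ps := by
          simp only [mySplit, if_neg hc, hps, List.modifyHead]
        rw [hms]
        simp only [lastSplit, if_pos ht]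
        obtain ⟨q, qs, hq⟩ := List.exists_cons_of_ne_nil hps2
        constructor
        · rw [List.dropLast_cons_of_ne_nil hps2]
          simp only [List.flatMap_cons]
          have h1 := ih.1
          rw [hps, List.dropLast_cons_of_ne_nil hps2] at h1
          simp only [List.flatMap_cons] at h1
          simp only [List.cons_append, List.append_assoc] at *
          rw [← h1]
        · rw [List.getLastD_cons]
          have h2 := ih.2
          rw [hps, List.getLastD_cons] at h2
          rw [hq] at h2 ⊢
          rw [List.getLastD_cons] at h2 ⊢
          exact h2
    · have hms : mySplit t = [t] := mySplit_no_bs ht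
      by_cases hc : c = '\\'
      · simp [mySplit, if_pos hc, lastSplit, if_neg ht, hc, hms, List.modifyHead]
      · simp [mySplit, if_neg hc, lastSplit, if_neg ht, hc, hms, List.modifyHead]

lemma rev_take_drop (cs : List Char) :
    ((cs.reverse.takeWhile (· != '\\')).reverse = (lastSplit cs).2)
    ∧ ((cs.reverse.dropWhile (· != '\\')).reverse = (lastSplit cs).1) := by
  induction cs with
  | nil => simp [lastSplit]
  | cons c t ih =>
    simp only [List.reverse_cons]
    rw [List.takeWhile_append, List.dropWhile_append]
    by_cases ht : '\\' ∈ t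
    · have hdw : t.reverse.dropWhile (· != '\\') ≠ [] := by
        rw [ne_eq, List.dropWhile_eq_nil_iff]
        intro h
        exact absurd (h '\\' (by simpa using ht)) (by simp)
      have htw : ¬ (t.reverse.takeWhile (· != '\\')).length = t.reverse.length := by
        intro h
        have hself := (List.takeWhile_prefix (p := (· != '\\')) (l := t.reverse)).eq_of_length h
        have hmem : '\\' ∈ t.reverse.takeWhile (· != '\\') := by
          rw [hself]; simpa using ht
        have := List.mem_takeWhile_imp hmem
        simp at this
      rw [if_neg htw, if_neg (by simpa [List.isEmpty_iff] using hdw)]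
      simp only [lastSplit, if_pos ht, List.reverse_append, List.reverse_cons,
        List.reverse_nil, List.nil_append, List.singleton_append]
      exact ⟨ih.1, by rw [← ih.2]⟩
    · have hdw : t.reverse.dropWhile (· != '\\') = [] := by
        rw [List.dropWhile_eq_nil_iff]
        intro x hx
        simp only [List.mem_reverse] at hx
        simp only [bne_iff_ne, ne_eq]
        intro h; rw [h] at hx; exact ht hx
      have htw : t.reverse.takeWhile (· != '\\') = t.reverse := by
        have := List.takeWhile_append_dropWhile (p := (· != '\\')) (l := t.reverse)
        rw [hdw, List.append_nil] at this
        exact this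
      rw [if_pos (by rw [htw]), if_pos (by rw [hdw]; rfl)]
      by_cases hc : c = '\\'
      · subst hc
        simp [lastSplit, if_neg ht, List.takeWhile, List.dropWhile]
      · have hb : (c != '\\') = true := by simp [hc]
        simp [lastSplit, if_neg ht, hc, List.takeWhile, List.dropWhile, hb]

lemma a_predpona_eq (cs : List Char) :
    (PySem.List.pyRange 0 (((mySplit cs).length : Int) - 1) 1).foldl
      (fun acc i => acc ++ PySem.List.pyGetD (mySplit cs) i [] ++ ['\\']) ([] : List Char)
      = (mySplit cs).dropLast.flatMap (· ++ ['\\']) := by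
  have hne := mySplit_ne_nil cs
  have hlen : ((mySplit cs).length : Int) - 1 = (((mySplit cs).dropLast.length : Nat) : Int) := by
    have := List.length_pos_of_ne_nil hne
    simp [List.length_dropLast]
    omega
  rw [hlen]
  have hstep : (PySem.List.pyRange 0 (((mySplit cs).dropLast.length : Nat) : Int) 1).foldl
      (fun acc i => acc ++ PySem.List.pyGetD (mySplit cs) i [] ++ ['\\']) ([] : List Char)
      = (PySem.List.pyRange 0 (((mySplit cs).dropLast.length : Nat) : Int) 1).foldl
      (fun acc i => acc ++ PySem.List.pyGetD (mySplit cs).dropLast i [] ++ ['\\']) ([] : List Char) := by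
    apply PySem.List.foldl_congr_mem
    intro acc i hi
    have hmem := (PySem.List.mem_pyRange_one.mp hi)
    have h0 : 0 ≤ i := hmem.1
    have h1 : i < ((mySplit cs).dropLast.length : Int) := hmem.2
    obtain ⟨k, hk⟩ := Int.eq_ofNat_of_zero_le h0
    subst hk
    have hk1 : k < (mySplit cs).dropLast.length := by exact_mod_cast h1
    have hk2 : k < (mySplit cs).length := by
      have h := hk1
      rw [List.length_dropLast] at h
      omega
    rw [PySem.List.pyGetD_natCast, PySem.List.pyGetD_natCast]
    rw [List.getD_eq_getElem _ _ hk2, List.getD_eq_getElem _ _ hk1]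
    rw [List.getElem_dropLast]
  rw [hstep]
  rw [PySem.List.foldl_pyRange_zero_pyGetD' ((mySplit cs).dropLast) []
        (fun acc x => acc ++ x ++ ['\\']) []]
  have : (fun (acc : List Char) (x : List Char) => acc ++ x ++ ['\\'])
       = fun acc x => acc ++ (x ++ ['\\']) := by
    funext acc x; simp [List.append_assoc]
  rw [this, PySem.List.foldl_append_eq_flatMap]
  simp

lemma a_file_eq (cs : List Char) :
    PySem.List.pyGetD (mySplit cs) (((mySplit cs).length : Int) - 1) []
      = (mySplit cs).getLastD [] := by
  have hne := mySplit_ne_nil cs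
  have hpos := List.length_pos_of_ne_nil hne
  have hlen : ((mySplit cs).length : Int) - 1 = (((mySplit cs).length - 1 : Nat) : Int) := by
    omega
  rw [hlen, PySem.List.pyGetD_natCast]
  rw [List.getD_eq_getElem _ _ (by omega)]
  rw [List.getLastD_eq_getLast? , List.getLast?_eq_getElem?]
  rw [List.getElem?_eq_getElem (by omega)]
  rfl

-- ===== VERDICT (by name: the statement is the Claim_ definition above) =====
theorem ziskejCestuProGenerovaniJs_spec : Claim_equal_ziskejCestuProGenerovaniJs := by
  intro s _
  unfold Spec_ziskejCestuProGenerovaniJs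
  unfold ziskejCestuProGenerovaniJs ziskejCestuProGenerovaniJs_alt
  simp only [splitOn_eq_mySplit]
  rw [a_predpona_eq, a_file_eq, (mySplit_to_lastSplit s.toList).1,
      (mySplit_to_lastSplit s.toList).2,
      (rev_take_drop s.toList).1, (rev_take_drop s.toList).2]
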